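-- pv_equiv track=rewrite | github.com/srivastavaresearchgroup/SAIPy | saipy/modules/multi_stations.py | merge_if_possible
-- ===== SOURCE A (Python) =====
-- def merge_if_possible(clusters):
--     # Attempt to merge clusters without repeated stations
--     merged = []
--     used = [False] * len(clusters)
--
--     for i, c1 in enumerate(clusters):
--         if used[i]:
--             continue
--         base = c1[:]
--         stations = set(d['station'] for d in base)
--         used[i] = True
--         for j in range(i + 1, len(clusters)):
--             if used[j]:
--                 continue
--             c2 = clusters[j]
--             stations_c2 = set(d['station'] for d in c2)
--             if stations.isdisjoint(stations_c2):
--                 base += c2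
--                 stations.update(stations_c2)
--                 used[j] = True
--         merged.append(base)
--
--     # The ones that couldn't be merged should also be returned
--     for i, flag in enumerate(used):
--         if not flag:
--             merged.append(clusters[i])
--
--     return merged
-- ===== SOURCE B (Python) =====
-- def merge_if_possible(clusters):
--     # Online first-fit grouping: a single pass over clusters; each cluster joins the
--     # first open group whose station set is disjoint, otherwise it opens a new group.
--     groups = []  # list of [member_list, station_set]
--     for c in clusters:
--         stations_c = set(d['station'] for d in c)
--         for g in groups:
--             if g[1].isdisjoint(stations_c):
--                 g[0] += c
--                 g[1] |= stations_c
--                 break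
--         else:
--             groups.append([c[:], stations_c])
--     return [g[0] for g in groups]
-- ===== Notes on version B (the rewrite author's own statement) =====
-- stated objective: alternative
-- what changed: Replaces A's offline seed-and-sweep (nested index loops over clusters with a used-flag array plus a dead cleanup pass) by an online first-fit grouping: one pass over the clusters, each cluster joining the first open group with a disjoint station set or opening a new group; no flags, no second pass over clusters.
import Mathlib
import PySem

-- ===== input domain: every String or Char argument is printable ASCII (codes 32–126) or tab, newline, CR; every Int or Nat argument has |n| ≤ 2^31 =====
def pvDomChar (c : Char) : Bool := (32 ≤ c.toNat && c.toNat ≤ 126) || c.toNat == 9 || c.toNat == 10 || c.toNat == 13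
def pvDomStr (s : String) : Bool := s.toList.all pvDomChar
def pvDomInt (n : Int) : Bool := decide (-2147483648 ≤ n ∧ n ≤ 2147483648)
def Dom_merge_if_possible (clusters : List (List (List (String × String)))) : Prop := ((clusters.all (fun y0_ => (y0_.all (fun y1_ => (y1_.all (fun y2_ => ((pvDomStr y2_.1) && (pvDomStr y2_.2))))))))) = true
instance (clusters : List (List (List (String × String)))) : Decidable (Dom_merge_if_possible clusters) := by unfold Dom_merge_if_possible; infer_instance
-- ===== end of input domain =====

-- B replaces A's used-flag nested index scan by an online first-fit grouping pass;
-- same return value, equivalence proved on the return value (neither mutates its argument).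

-- ===== PORT A =====

-- d['station'] (under Pre_ the key is present, so getD "" is never reached)
def pvKey (d : List (String × String)) : String :=
  ((PySem.Dict.mk d).get? "station").getD ""

-- set(d['station'] for d in c)
def pvStations (c : List (List (String × String))) : PySem.Set String :=
  PySem.Set.ofList (c.map pvKey)

-- inner loop: for j in range(i+1, len(clusters)): …  (state = (base, stations, used))
def pvInnerA (clusters : List (List (List (String × String)))) (i n : Nat)
    (st : List (List (String × String)) × PySem.Set String × List Bool) :
    List (List (String × String)) × PySem.Set String × List Bool :=
  (PySem.List.pyRange (↑(i+1)) (↑n) 1).foldl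
    (fun s j =>
      if PySem.List.pyGetD s.2.2 j false then s
      else
        let c2 := PySem.List.pyGetD clusters j []
        let stations_c2 := pvStations c2
        if PySem.Set.isdisjoint s.2.1 stations_c2 then
          (s.1 ++ c2, PySem.Set.update s.2.1 stations_c2, PySem.List.pySetD s.2.2 j true)
        else s)
    st

-- outer loop: for i, c1 in enumerate(clusters): …  (structural recursion with the enumerate counter;
-- i is always < used.length, so used.getD i false reads exactly Python's used[i])
def pvOuterA (clusters : List (List (List (String × String)))) (n : Nat) :
    Nat → List (List (List (String × String))) →
    List (List (List (String × String))) × List Bool →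
    List (List (List (String × String))) × List Bool
  | _, [], st => st
  | i, c1 :: rest, (merged, used) =>
    if used.getD i false then pvOuterA clusters n (i+1) rest (merged, used)
    else
      let base := c1
      let stations := pvStations base
      let used1 := used.set i true
      let r := pvInnerA clusters i n (base, stations, used1)
      pvOuterA clusters n (i+1) rest (merged ++ [r.1], r.2.2)

-- second loop: for i, flag in enumerate(used): if not flag: merged.append(clusters[i])
def pvTailA (clusters : List (List (List (String × String)))) :
    Nat → List Bool → List (List (List (String × String))) →
    List (List (List (String × String)))
  | _, [], merged => merged
  | i, f :: rest, merged =>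
    pvTailA clusters (i+1) rest (if f then merged else merged ++ [clusters.getD i []])

def merge_if_possible (clusters : List (List (List (String × String)))) :
    List (List (List (String × String))) :=
  let n := clusters.length
  let r := pvOuterA clusters n 0 clusters ([], List.replicate n false)
  pvTailA clusters 0 r.2 r.1

-- ===== PORT B =====

-- the inner 'for g in groups: … break / else append' of Source B, as structural recursion on groups
def pvInsert (c : List (List (String × String))) (sc : PySem.Set String) :
    List (List (List (String × String)) × PySem.Set String) →
    List (List (List (String × String)) × PySem.Set String)
  | [] => [(c, sc)]
  | (b, s) :: gs =>
    if PySem.Set.isdisjoint s sc then (b ++ c, PySem.Set.update s sc) :: gs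
    else (b, s) :: pvInsert c sc gs

def merge_if_possible_alt (clusters : List (List (List (String × String)))) :
    List (List (List (String × String))) :=
  (clusters.foldl (fun gs c => pvInsert c (pvStations c) gs)
      ([] : List (List (List (String × String)) × PySem.Set String))).map Prod.fst

-- ===== PRECONDITION & SPEC =====
-- Pre_ excludes exactly the inputs where A raises KeyError: some cluster contains a dict without key 'station'.
def Pre_merge_if_possible (clusters : List (List (List (String × String)))) : Prop :=
  (clusters.all (fun c => c.all (fun d => ((PySem.Dict.mk d).get? "station").isSome))) = true
instance (clusters : List (List (List (String × String)))) : Decidable (Pre_merge_if_possible clusters) := by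
  unfold Pre_merge_if_possible; infer_instance

def pvWitness_merge_if_possible : (List (List (List (String × String)))) :=
  [[[("station", "A")], [("station", "B")]], [[("station", "A")]]]

def Spec_merge_if_possible (clusters : List (List (List (String × String)))) (out : List (List (List (String × String)))) : Prop := out = merge_if_possible_alt clusters
instance (clusters : List (List (List (String × String)))) (out : List (List (List (String × String)))) : Decidable (Spec_merge_if_possible clusters out) := by unfold Spec_merge_if_possible; infer_instance

-- ===== CLAIM (what is proved, stated in full; the proofs are below) =====
def Claim_equal_merge_if_possible : Prop := ∀ (clusters : List (List (List (String × String)))), Dom_merge_if_possible clusters → Pre_merge_if_possible clusters → Spec_merge_if_possible clusters (merge_if_possible clusters)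

-- ===== LEMMAS AND PROOFS =====

-- proof-only intermediate: the worklist algorithm (pop head, partition the rest); both
-- A's seed-and-sweep and B's first-fit are shown equal to pvGo.
def pvStep (s : List (List (String × String)) × PySem.Set String × List (List (List (String × String))))
    (c2 : List (List (String × String))) :
    List (List (String × String)) × PySem.Set String × List (List (List (String × String))) :=
  let stations_c2 := pvStations c2
  if PySem.Set.isdisjoint s.2.1 stations_c2 then
    (s.1 ++ c2, PySem.Set.update s.2.1 stations_c2, s.2.2)
  else (s.1, s.2.1, s.2.2 ++ [c2])

theorem pvStep_rem_le (l : List (List (List (String × String))))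
    (init : List (List (String × String)) × PySem.Set String × List (List (List (String × String)))) :
    (l.foldl pvStep init).2.2.length ≤ init.2.2.length + l.length := by
  induction l generalizing init with
  | nil => simp
  | cons c rest ih =>
    refine le_trans (ih _) ?_
    simp only [pvStep]
    split
    · simp
    · simp; omega

def pvGo : List (List (List (String × String))) → List (List (List (String × String)))
  | [] => []
  | c :: rest =>
    let r := rest.foldl pvStep (c, pvStations c, [])
    r.1 :: pvGo r.2.2
termination_by l => l.length
decreasing_by
  have h := pvStep_rem_le rest (c, pvStations c, [])
  simp only [List.foldl_attach]
  simp at h ⊢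
  omega

-- intermediate: A's inner loop seen as structural recursion over (cluster, flag) pairs
def innerT : List (List (List (String × String)) × Bool) →
    List (List (String × String)) → PySem.Set String →
    List (List (String × String)) × PySem.Set String × List (List (List (String × String)) × Bool)
  | [], b, s => (b, s, [])
  | (c, f) :: rest, b, s =>
    if f then
      let r := innerT rest b s
      (r.1, r.2.1, (c, true) :: r.2.2)
    else
      let stc := pvStations c
      if PySem.Set.isdisjoint s stc then
        let r := innerT rest (b ++ c) (PySem.Set.update s stc)
        (r.1, r.2.1, (c, true) :: r.2.2)
      else
        let r := innerT rest b s
        (r.1, r.2.1, (c, false) :: r.2.2)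

theorem innerT_len (l : List (List (List (String × String)) × Bool))
    (b : List (List (String × String))) (s : PySem.Set String) :
    (innerT l b s).2.2.length = l.length := by
  induction l generalizing b s with
  | nil => rfl
  | cons p rest ih =>
    obtain ⟨c, f⟩ := p
    simp only [innerT]
    split
    · simp [ih]
    · split <;> simp [ih]

def outerT : List (List (List (String × String)) × Bool) → List (List (List (String × String)))
  | [] => []
  | (c, f) :: rest =>
    if f then outerT rest
    else
      let r := innerT rest c (pvStations c)
      r.1 :: outerT r.2.2
termination_by l => l.length
decreasing_by
  all_goals simp_all [innerT_len]

theorem innerT_fst (l : List (List (List (String × String)) × Bool))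
    (b : List (List (String × String))) (s : PySem.Set String) :
    (innerT l b s).2.2.map Prod.fst = l.map Prod.fst := by
  induction l generalizing b s with
  | nil => rfl
  | cons p rest ih =>
    obtain ⟨c, f⟩ := p
    simp only [innerT]
    split
    · simp [ih]
    · split <;> simp [ih]

def unflagged (l : List (List (List (String × String)) × Bool)) :
    List (List (List (String × String))) :=
  l.filterMap (fun p => if p.2 then none else some p.1)

theorem foldl_step_eq (l : List (List (List (String × String)) × Bool))
    (b : List (List (String × String))) (s : PySem.Set String)
    (acc : List (List (List (String × String)))) :
    (unflagged l).foldl pvStep (b, s, acc)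
      = ((innerT l b s).1, (innerT l b s).2.1, acc ++ unflagged (innerT l b s).2.2) := by
  induction l generalizing b s acc with
  | nil => simp [innerT, unflagged]
  | cons p rest ih =>
    obtain ⟨c, f⟩ := p
    by_cases hf : f
    · subst hf
      show (unflagged ((c, true) :: rest)).foldl pvStep (b, s, acc) = _
      have h1 : unflagged ((c, true) :: rest) = unflagged rest := by simp [unflagged]
      have h2 : unflagged (innerT ((c, true) :: rest) b s).2.2
          = unflagged (innerT rest b s).2.2 := by simp [innerT, unflagged]
      rw [h1, h2, ih b s acc]
      simp [innerT]
    · simp only [Bool.not_eq_true] at hf; subst hf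
      have h1 : unflagged ((c, false) :: rest) = c :: unflagged rest := by simp [unflagged]
      rw [h1, List.foldl_cons]
      show (unflagged rest).foldl pvStep (pvStep (b, s, acc) c) = _
      by_cases hd : PySem.Set.isdisjoint s (pvStations c) = true
      · have h2 : innerT ((c, false) :: rest) b s
            = ((innerT rest (b ++ c) (PySem.Set.update s (pvStations c))).1,
               (innerT rest (b ++ c) (PySem.Set.update s (pvStations c))).2.1,
               (c, true) :: (innerT rest (b ++ c) (PySem.Set.update s (pvStations c))).2.2) := by
          simp [innerT, hd]
        have h3 : pvStep (b, s, acc) c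
            = (b ++ c, PySem.Set.update s (pvStations c), acc) := by simp [pvStep, hd]
        rw [h2, h3, ih]
        simp [unflagged]
      · have h2 : innerT ((c, false) :: rest) b s
            = ((innerT rest b s).1, (innerT rest b s).2.1,
               (c, false) :: (innerT rest b s).2.2) := by
          simp [innerT, hd]
        have h3 : pvStep (b, s, acc) c = (b, s, acc ++ [c]) := by simp [pvStep, hd]
        rw [h2, h3, ih]
        simp [unflagged]

theorem outerT_eq_go (l : List (List (List (String × String)) × Bool)) :
    outerT l = pvGo (unflagged l) := by
  generalize hn : l.length = n
  induction n using Nat.strong_induction_on generalizing l with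
  | _ n ih =>
    match l with
    | [] => simp only [unflagged, List.filterMap_nil]; rw [outerT, pvGo]
    | (c, f) :: rest =>
      by_cases hf : f
      · subst hf
        have h1 : unflagged ((c, true) :: rest) = unflagged rest := by simp [unflagged]
        rw [outerT, if_pos rfl, h1]
        exact ih rest.length (by simp at hn; omega) rest rfl
      · simp only [Bool.not_eq_true] at hf; subst hf
        rw [outerT, if_neg Bool.false_ne_true]
        have hu : unflagged ((c, false) :: rest) = c :: unflagged rest := by
          simp [unflagged]
        rw [hu]
        rw [pvGo, foldl_step_eq rest c (pvStations c) []]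
        simp only [List.nil_append]
        congr 1
        have hlen : (innerT rest c (pvStations c)).2.2.length = rest.length :=
          innerT_len _ _ _
        exact ih (innerT rest c (pvStations c)).2.2.length (by simp at hn; omega) _ rfl

-- A's inner index loop equals innerT over the zipped suffixes
theorem innerA_eq (clusters : List (List (List (String × String)))) :
    ∀ (d j : Nat), clusters.length ≤ j + d →
    ∀ (b : List (List (String × String))) (s : PySem.Set String) (used : List Bool),
    used.length = clusters.length →
    ((PySem.List.pyRange (↑j) (↑clusters.length) 1).foldl
      (fun st k =>
        if PySem.List.pyGetD st.2.2 k false then st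
        else
          if PySem.Set.isdisjoint st.2.1 (pvStations (PySem.List.pyGetD clusters k [])) then
            (st.1 ++ PySem.List.pyGetD clusters k [],
             PySem.Set.update st.2.1 (pvStations (PySem.List.pyGetD clusters k [])),
             PySem.List.pySetD st.2.2 k true)
          else st)
      (b, s, used))
    = ((innerT ((clusters.drop j).zip (used.drop j)) b s).1,
       (innerT ((clusters.drop j).zip (used.drop j)) b s).2.1,
       used.take j ++ ((innerT ((clusters.drop j).zip (used.drop j)) b s).2.2.map Prod.snd)) := by
  intro d
  induction d with
  | zero =>
    intro j hj b s used hlen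
    have h1 : PySem.List.pyRange (↑j) (↑clusters.length) 1 = [] := by
      rw [PySem.List.pyRange_one]
      have h0 : ((↑clusters.length : Int) - ↑j).toNat = 0 := by omega
      simp [h0]
    have h2 : clusters.drop j = [] := List.drop_eq_nil_of_le (by omega)
    have h3 : used.take j = used := List.take_of_length_le (by omega)
    rw [h1, h2]
    simp [innerT, h3]
  | succ d ih =>
    intro j hj b s used hlen
    by_cases hjlt : j < clusters.length
    · have hcons : PySem.List.pyRange (↑j) (↑clusters.length) 1
          = (↑j : Int) :: PySem.List.pyRange (↑j + 1) (↑clusters.length) 1 :=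
        PySem.List.pyRange_one_cons (by exact_mod_cast hjlt)
      have hjused : j < used.length := by omega
      have hdropc : clusters.drop j = clusters[j] :: clusters.drop (j+1) :=
        List.drop_eq_getElem_cons hjlt
      have hdropu : used.drop j = used[j] :: used.drop (j+1) :=
        List.drop_eq_getElem_cons hjused
      have hgd : PySem.List.pyGetD used (↑j) false = used[j] := by
        rw [PySem.List.pyGetD_natCast, List.getD_eq_getElem used false hjused]
      have hgc : PySem.List.pyGetD clusters (↑j) [] = clusters[j] := by
        rw [PySem.List.pyGetD_natCast, List.getD_eq_getElem clusters [] hjlt]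
      have hcast : ((↑j : Int) + 1) = ((j+1 : Nat) : Int) := by push_cast; ring
      rw [hcons, List.foldl_cons, hdropc, hdropu, List.zip_cons_cons]
      by_cases hu : used[j] = true
      · -- used[j]: skip this j
        rw [hgd, hu, if_pos rfl, hcast, ih (j+1) (by omega) b s used hlen]
        have he : innerT ((clusters[j], true) :: (clusters.drop (j+1)).zip (used.drop (j+1))) b s
            = ((innerT ((clusters.drop (j+1)).zip (used.drop (j+1))) b s).1,
               (innerT ((clusters.drop (j+1)).zip (used.drop (j+1))) b s).2.1,
               (clusters[j], true) :: (innerT ((clusters.drop (j+1)).zip (used.drop (j+1))) b s).2.2) := by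
          simp [innerT]
        rw [he]
        have ht : used.take (j+1) = used.take j ++ [true] := by
          rw [List.take_add_one]; simp [hjused, hu]
        simp [ht]
      · -- not yet used
        have hufalse : used[j] = false := by simpa using hu
        rw [hgd, hufalse, if_neg Bool.false_ne_true, hgc]
        by_cases hd : PySem.Set.isdisjoint s (pvStations clusters[j]) = true
        · rw [if_pos hd]
          have hset : PySem.List.pySetD used (↑j) true = used.set j true := by simp
          rw [hset, hcast,
            ih (j+1) (by omega) (b ++ clusters[j])
              (PySem.Set.update s (pvStations clusters[j])) (used.set j true) (by simp [hlen])]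
          have hds : (used.set j true).drop (j+1) = used.drop (j+1) := by
            simp [List.drop_set]
          have hts : (used.set j true).take (j+1) = used.take j ++ [true] := by
            rw [List.take_add_one]
            simp [List.take_set, List.getElem?_set_self hjused, List.set_eq_of_length_le]
          have he : innerT ((clusters[j], false) :: (clusters.drop (j+1)).zip (used.drop (j+1))) b s
              = ((innerT ((clusters.drop (j+1)).zip (used.drop (j+1))) (b ++ clusters[j])
                    (PySem.Set.update s (pvStations clusters[j]))).1,
                 (innerT ((clusters.drop (j+1)).zip (used.drop (j+1))) (b ++ clusters[j])
                    (PySem.Set.update s (pvStations clusters[j]))).2.1,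
                 (clusters[j], true) :: (innerT ((clusters.drop (j+1)).zip (used.drop (j+1)))
                    (b ++ clusters[j]) (PySem.Set.update s (pvStations clusters[j]))).2.2) := by
            simp [innerT, hd]
          rw [hds, he]
          simp [hts]
        · rw [if_neg hd, hcast, ih (j+1) (by omega) b s used hlen]
          have he : innerT ((clusters[j], false) :: (clusters.drop (j+1)).zip (used.drop (j+1))) b s
              = ((innerT ((clusters.drop (j+1)).zip (used.drop (j+1))) b s).1,
                 (innerT ((clusters.drop (j+1)).zip (used.drop (j+1))) b s).2.1,
                 (clusters[j], false) :: (innerT ((clusters.drop (j+1)).zip (used.drop (j+1))) b s).2.2) := by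
            simp [innerT, hd]
          rw [he]
          have ht : used.take (j+1) = used.take j ++ [false] := by
            rw [List.take_add_one]; simp [hjused, hufalse]
          simp [ht]
    · have h1 : PySem.List.pyRange (↑j) (↑clusters.length) 1 = [] := by
        rw [PySem.List.pyRange_one]
        have h0 : ((clusters.length : Int) - (j : Int)).toNat = 0 := by omega
        rw [h0]; simp
      have h2 : clusters.drop j = [] := List.drop_eq_nil_of_le (by omega)
      have h3 : used.take j = used := List.take_of_length_le (by omega)
      rw [h1, h2]
      simp [innerT, h3]

-- A's outer loop: result list matches outerT, and all flags end up true
theorem outerA_eq (clusters : List (List (List (String × String)))) :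
    ∀ (d i : Nat), clusters.length ≤ i + d →
    ∀ (merged : List (List (List (String × String)))) (used : List Bool),
    used.length = clusters.length →
    (∀ k, k < i → used.getD k false = true) →
    (pvOuterA clusters clusters.length i (clusters.drop i) (merged, used)).1
        = merged ++ outerT ((clusters.drop i).zip (used.drop i))
    ∧ (pvOuterA clusters clusters.length i (clusters.drop i) (merged, used)).2.all
        (fun x => x) = true := by
  intro d
  induction d with
  | zero =>
    intro i hi merged used hlen hall
    have h2 : clusters.drop i = [] := List.drop_eq_nil_of_le (by omega)
    rw [h2]
    refine ⟨by simp [pvOuterA, outerT], ?_⟩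
    simp only [pvOuterA, List.all_eq_true]
    intro x hx
    obtain ⟨k, hk, rfl⟩ := List.mem_iff_getElem.mp hx
    have := hall k (by omega)
    rwa [List.getD_eq_getElem used false hk] at this
  | succ d ih =>
    intro i hi merged used hlen hall
    by_cases hilt : i < clusters.length
    · have hiu : i < used.length := by omega
      have hdropc : clusters.drop i = clusters[i] :: clusters.drop (i+1) :=
        List.drop_eq_getElem_cons hilt
      have hdropu : used.drop i = used[i] :: used.drop (i+1) :=
        List.drop_eq_getElem_cons hiu
      rw [hdropc, hdropu, List.zip_cons_cons]
      simp only [pvOuterA, List.getD_eq_getElem used false hiu]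
      by_cases hu : used[i] = true
      · rw [hu, if_pos rfl]
        have hall' : ∀ k, k < i + 1 → used.getD k false = true := by
          intro k hk
          by_cases hki : k < i
          · exact hall k hki
          · have : k = i := by omega
            subst this
            rw [List.getD_eq_getElem used false hiu, hu]
        have hrec := ih (i+1) (by omega) merged used hlen hall'
        have houter : outerT ((clusters[i], true) :: (clusters.drop (i+1)).zip (used.drop (i+1)))
            = outerT ((clusters.drop (i+1)).zip (used.drop (i+1))) := by
          rw [outerT]; simp
        rw [houter]
        exact hrec
      · rw [if_neg hu]
        have hufalse : used[i] = false := by simpa using hu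
        simp only [pvInnerA]
        rw [innerA_eq clusters (clusters.length) (i+1) (by omega) clusters[i]
            (pvStations clusters[i]) (used.set i true) (by simp [hlen])]
        have hds : (used.set i true).drop (i+1) = used.drop (i+1) := by
          simp [List.drop_set]
        have hts : (used.set i true).take (i+1) = used.take i ++ [true] := by
          rw [List.take_add_one]
          simp [List.take_set, List.getElem?_set_self hiu, List.set_eq_of_length_le]
        rw [hds, hts]
        set X := innerT ((clusters.drop (i+1)).zip (used.drop (i+1))) clusters[i]
          (pvStations clusters[i]) with hX
        have hzlen : ((clusters.drop (i+1)).zip (used.drop (i+1))).length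
            = clusters.length - (i+1) := by
          simp [List.length_zip, hlen]
        have hXlen : X.2.2.length = clusters.length - (i+1) := by
          rw [hX, innerT_len, hzlen]
        have hused' : ((used.take i ++ [true]) ++ X.2.2.map Prod.snd).length
            = clusters.length := by
          simp [List.length_take, hXlen]
          omega
        have hall' : ∀ k, k < i + 1 →
            ((used.take i ++ [true]) ++ X.2.2.map Prod.snd).getD k false = true := by
          intro k hk
          have hklen : k < ((used.take i ++ [true]) ++ X.2.2.map Prod.snd).length := by
            rw [hused']; omega
          rw [List.getD_eq_getElem _ false hklen]
          have hfirst : k < (used.take i ++ [true]).length := by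
            simp [List.length_take]; omega
          rw [List.getElem_append_left hfirst]
          by_cases hki : k < i
          · have hkt : k < (used.take i).length := by simp [List.length_take]; omega
            rw [List.getElem_append_left hkt]
            have := hall k hki
            rw [List.getD_eq_getElem used false (by omega)] at this
            simpa [List.getElem_take] using this
          · have hkt : (used.take i).length ≤ k := by simp [List.length_take]; omega
            rw [List.getElem_append_right hkt]
            simp
        have hrec := ih (i+1) (by omega) (merged ++ [X.1])
          ((used.take i ++ [true]) ++ X.2.2.map Prod.snd) hused' hall'
        have hdrop' : ((used.take i ++ [true]) ++ X.2.2.map Prod.snd).drop (i+1)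
            = X.2.2.map Prod.snd := by
          have : (used.take i ++ [true]).length = i + 1 := by
            simp [List.length_take, min_eq_left (le_of_lt hiu)]
          rw [← this, List.drop_left]
        have hfst : X.2.2.map Prod.fst = clusters.drop (i+1) := by
          rw [hX, innerT_fst, List.map_fst_zip]
          simp [hlen]
        have hzip : (clusters.drop (i+1)).zip (X.2.2.map Prod.snd) = X.2.2 := by
          rw [← hfst]
          exact (List.zip_of_prod rfl rfl).symm
        rw [hdrop', hzip] at hrec
        refine ⟨?_, hrec.2⟩
        rw [hrec.1, outerT, if_neg hu]
        simp [← hX]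
    · have h2 : clusters.drop i = [] := List.drop_eq_nil_of_le (by omega)
      rw [h2]
      refine ⟨by simp [pvOuterA, outerT], ?_⟩
      simp only [pvOuterA, List.all_eq_true]
      intro x hx
      obtain ⟨k, hk, rfl⟩ := List.mem_iff_getElem.mp hx
      have := hall k (by omega)
      rwa [List.getD_eq_getElem used false hk] at this

theorem unflagged_zip_replicate (l : List (List (List (String × String)))) :
    unflagged (l.zip (List.replicate l.length false)) = l := by
  induction l with
  | nil => rfl
  | cons c rest ih =>
    simp only [List.length_cons, List.replicate_succ, List.zip_cons_cons]
    simpa [unflagged] using ih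

theorem tailA_eq (clusters : List (List (List (String × String)))) :
    ∀ (i : Nat) (used : List Bool) (merged : List (List (List (String × String)))),
    used.all (fun x => x) = true →
    pvTailA clusters i used merged = merged := by
  intro i used
  induction used generalizing i with
  | nil => intro merged _; rfl
  | cons f rest ih =>
    intro merged h
    simp only [List.all_cons, Bool.and_eq_true] at h
    simp only [pvTailA, h.1, if_true]
    exact ih (i+1) merged h.2

-- ===== B-side lemmas: first-fit equals the worklist pvGo =====

-- the accumulator of pvStep's fold is a pure suffix-append
theorem foldl_pvStep_acc (l : List (List (List (String × String))))
    (b : List (List (String × String))) (s : PySem.Set String)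
    (acc : List (List (List (String × String)))) :
    l.foldl pvStep (b, s, acc)
      = ((l.foldl pvStep (b, s, [])).1, (l.foldl pvStep (b, s, [])).2.1,
         acc ++ (l.foldl pvStep (b, s, [])).2.2) := by
  induction l generalizing b s acc with
  | nil => simp
  | cons c rest ih =>
    simp only [List.foldl_cons]
    by_cases hd : PySem.Set.isdisjoint s (pvStations c) = true
    · have h1 : pvStep (b, s, acc) c
          = (b ++ c, PySem.Set.update s (pvStations c), acc) := by simp [pvStep, hd]
      have h2 : pvStep (b, s, []) c
          = (b ++ c, PySem.Set.update s (pvStations c), []) := by simp [pvStep, hd]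
      rw [h1, h2]
      exact ih _ _ acc
    · have h1 : pvStep (b, s, acc) c = (b, s, acc ++ [c]) := by simp [pvStep, hd]
      have h2 : pvStep (b, s, []) c = (b, s, [c]) := by simp [pvStep, hd]
      rw [h1, h2, ih _ _ (acc ++ [c]), ih _ _ [c]]
      simp

def pvFFRun (gs : List (List (List (String × String)) × PySem.Set String))
    (l : List (List (List (String × String)))) :
    List (List (List (String × String)) × PySem.Set String) :=
  l.foldl (fun gs c => pvInsert c (pvStations c) gs) gs

-- first-fit with a leading open group = partition the list against that group, then
-- first-fit the rejected clusters against the remaining groups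
theorem ffRun_cons (l : List (List (List (String × String))))
    (g0 : List (List (String × String)) × PySem.Set String)
    (gs : List (List (List (String × String)) × PySem.Set String)) :
    pvFFRun (g0 :: gs) l
      = ((l.foldl pvStep (g0.1, g0.2, [])).1, (l.foldl pvStep (g0.1, g0.2, [])).2.1)
          :: pvFFRun gs (l.foldl pvStep (g0.1, g0.2, [])).2.2 := by
  induction l generalizing g0 gs with
  | nil => simp [pvFFRun]
  | cons c rest ih =>
    simp only [pvFFRun, List.foldl_cons]
    by_cases hd : PySem.Set.isdisjoint g0.2 (pvStations c) = true
    · have h1 : pvInsert c (pvStations c) (g0 :: gs)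
          = (g0.1 ++ c, PySem.Set.update g0.2 (pvStations c)) :: gs := by
        cases g0; simp [pvInsert, hd]
      have h2 : pvStep (g0.1, g0.2, []) c
          = (g0.1 ++ c, PySem.Set.update g0.2 (pvStations c), []) := by
        simp [pvStep, hd]
      rw [h1, h2]
      exact ih (g0.1 ++ c, PySem.Set.update g0.2 (pvStations c)) gs
    · have h1 : pvInsert c (pvStations c) (g0 :: gs)
          = g0 :: pvInsert c (pvStations c) gs := by
        cases g0; simp [pvInsert, hd]
      have h2 : pvStep (g0.1, g0.2, []) c = (g0.1, g0.2, [c]) := by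
        simp [pvStep, hd]
      rw [h1, h2, foldl_pvStep_acc rest g0.1 g0.2 [c]]
      show pvFFRun (g0 :: pvInsert c (pvStations c) gs) rest = _
      rw [ih g0 (pvInsert c (pvStations c) gs)]
      dsimp only
      congr 1

theorem ff_eq_go (l : List (List (List (String × String)))) :
    (pvFFRun [] l).map Prod.fst = pvGo l := by
  generalize hn : l.length = n
  induction n using Nat.strong_induction_on generalizing l with
  | _ n ih =>
    match l with
    | [] => simp [pvFFRun, pvGo]
    | c :: rest =>
      have h0 : pvFFRun [] (c :: rest) = pvFFRun [(c, pvStations c)] rest := by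
        simp [pvFFRun, pvInsert]
      rw [h0, ffRun_cons rest (c, pvStations c) []]
      have hlen := pvStep_rem_le rest (c, pvStations c, [])
      simp only [List.length_nil, Nat.zero_add] at hlen
      rw [pvGo]
      simp only [List.map_cons]
      congr 1
      exact ih (rest.foldl pvStep (c, pvStations c, [])).2.2.length
        (by simp at hn; omega) _ rfl

-- ===== VERDICT (by name: the statement is the Claim_ definition above) =====
theorem merge_if_possible_spec : Claim_equal_merge_if_possible := by
  intro clusters _ _
  unfold Spec_merge_if_possible merge_if_possible merge_if_possible_alt
  have h := outerA_eq clusters clusters.length 0 (by omega) [] (List.replicate clusters.length false)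
    (by simp) (by intro k hk; omega)
  simp only [List.drop_zero] at h
  rw [tailA_eq clusters 0 _ _ h.2, h.1, List.nil_append]
  rw [outerT_eq_go, unflagged_zip_replicate]
  exact (ff_eq_go clusters).symm
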